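-- pv_equiv track=rewrite | github.com/chuksoo/CodeMasters | TIP102 - Intermediate Technical Interview Prep/Unit 1 practice.py | tiggerfy
-- ===== SOURCE A (Python) =====
-- def tiggerfy(word):
--     result = []
--     i = 0
--     while i < len(word):
--         if word[i:i+2] == 'gg' or word[i:i+2] == 'GG':
--             i += 2
--         elif word[i:i+2] == 'er' or word[i:i+2] == 'ER':
--             i += 2
--         elif word[i] == 't' or word[i] == 'T' or word[i] == 'i' or word[i] == 'I':
--             i += 1
--         else:
--             result.append(word[i])
--             i += 1
--     return ''.join(result)
-- ===== SOURCE B (Python) =====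
-- import re
--
-- _TIGGER = re.compile(r'gg|GG|er|ER|[tTiI]')
--
-- def tiggerfy(word):
--     return _TIGGER.sub('', word)
-- ===== Notes on version B (the rewrite author's own statement) =====
-- stated objective: idiomatic
-- what changed: The manual index loop with 2-char slice peeking and an accumulator list is replaced by a single re.sub with ordered alternation (gg|GG|er|ER|[tTiI]), whose pair-before-single priority reproduces A's advancement rule; the scan runs in the C regex engine instead of a Python bytecode loop.
import Mathlib
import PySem

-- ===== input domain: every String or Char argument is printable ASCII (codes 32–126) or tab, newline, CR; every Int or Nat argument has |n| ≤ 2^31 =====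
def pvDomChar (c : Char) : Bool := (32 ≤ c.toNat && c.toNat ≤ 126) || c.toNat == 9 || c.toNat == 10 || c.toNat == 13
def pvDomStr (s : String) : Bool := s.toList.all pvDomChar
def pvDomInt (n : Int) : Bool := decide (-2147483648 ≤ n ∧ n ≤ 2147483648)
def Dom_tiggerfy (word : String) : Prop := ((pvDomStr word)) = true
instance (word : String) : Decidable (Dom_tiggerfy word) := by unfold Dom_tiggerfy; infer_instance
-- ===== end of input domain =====

-- B replaces A's manual index loop by one ordered-alternation regex substitution (idiomatic; same cost).

-- ===== PORT A =====
-- A's while-loop: index i, slice word[i:i+2] (for 0 ≤ i this is exactly (drop i).take 2),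
-- word[i] is cs[i] (0 ≤ i < len), result accumulator appended at the back.
def tigLoopA (cs : List Char) (i : Nat) (result : List Char) : List Char :=
  if h : i < cs.length then
    let two := (cs.drop i).take 2
    if two = ['g','g'] ∨ two = ['G','G'] then
      tigLoopA cs (i+2) result
    else if two = ['e','r'] ∨ two = ['E','R'] then
      tigLoopA cs (i+2) result
    else if cs[i] = 't' ∨ cs[i] = 'T' ∨ cs[i] = 'i' ∨ cs[i] = 'I' then
      tigLoopA cs (i+1) result
    else
      tigLoopA cs (i+1) (result ++ [cs[i]])
  else result
termination_by cs.length - i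

def tiggerfy (word : String) : String := String.ofList (tigLoopA word.toList 0 [])

-- ===== PORT B =====
-- Hand port of re.sub(r'gg|GG|er|ER|[tTiI]', '', word): exact for this regex — re scans left to
-- right, at each position tries the alternatives in the pattern's order (the two-char literals
-- before the one-char class), deletes a match and resumes after it, otherwise keeps the char.
def tigSubB : List Char → List Char
  | [] => []
  | [c1] =>
      if c1 = 't' ∨ c1 = 'T' ∨ c1 = 'i' ∨ c1 = 'I' then [] else [c1]
  | c1 :: c2 :: rest' =>
      if (c1 = 'g' ∧ c2 = 'g') ∨ (c1 = 'G' ∧ c2 = 'G') ∨ (c1 = 'e' ∧ c2 = 'r') ∨ (c1 = 'E' ∧ c2 = 'R') then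
        tigSubB rest'
      else if c1 = 't' ∨ c1 = 'T' ∨ c1 = 'i' ∨ c1 = 'I' then
        tigSubB (c2 :: rest')
      else
        c1 :: tigSubB (c2 :: rest')

def tiggerfy_alt (word : String) : String := String.ofList (tigSubB word.toList)

-- ===== PRECONDITION & SPEC =====
def Spec_tiggerfy (word : String) (out : String) : Prop := out = tiggerfy_alt word
instance (word : String) (out : String) : Decidable (Spec_tiggerfy word out) := by unfold Spec_tiggerfy; infer_instance

-- ===== CLAIM (what is proved, stated in full; the proofs are below) =====
def Claim_equal_tiggerfy : Prop := ∀ (word : String), Dom_tiggerfy word → Spec_tiggerfy word (tiggerfy word)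

-- ===== LEMMAS AND PROOFS =====
lemma tigSubB_nil : tigSubB [] = [] := by rw [tigSubB]

lemma tigSubB_one (c1 : Char) :
    tigSubB [c1] = if c1 = 't' ∨ c1 = 'T' ∨ c1 = 'i' ∨ c1 = 'I' then [] else [c1] := by
  rw [tigSubB]

lemma tigSubB_cons (c1 c2 : Char) (rest' : List Char) :
    tigSubB (c1 :: c2 :: rest') =
      if (c1 = 'g' ∧ c2 = 'g') ∨ (c1 = 'G' ∧ c2 = 'G') ∨ (c1 = 'e' ∧ c2 = 'r') ∨ (c1 = 'E' ∧ c2 = 'R') then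
        tigSubB rest'
      else if c1 = 't' ∨ c1 = 'T' ∨ c1 = 'i' ∨ c1 = 'I' then
        tigSubB (c2 :: rest')
      else
        c1 :: tigSubB (c2 :: rest') := by
  rw [tigSubB]

lemma tigLoopA_eq (cs : List Char) :
    ∀ (n i : Nat) (result : List Char), cs.length - i ≤ n →
      tigLoopA cs i result = result ++ tigSubB (cs.drop i) := by
  intro n
  induction n with
  | zero =>
    intro i result h
    have hi : cs.length ≤ i := by omega
    rw [tigLoopA, dif_neg (by omega : ¬ i < cs.length),
        List.drop_eq_nil_of_le hi, tigSubB_nil, List.append_nil]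
  | succ n ih =>
    intro i result h
    by_cases hi : i < cs.length
    · have hdrop : cs.drop i = cs[i] :: cs.drop (i + 1) := List.drop_eq_getElem_cons hi
      rw [tigLoopA, dif_pos hi]
      cases h2 : cs.drop (i + 1) with
      | nil =>
        have htwo : (cs.drop i).take 2 = [cs[i]] := by rw [hdrop, h2]; rfl
        rw [htwo, hdrop, h2, tigSubB_one]
        rw [if_neg (by simp : ¬([cs[i]] = ['g','g'] ∨ [cs[i]] = ['G','G']))]
        rw [if_neg (by simp : ¬([cs[i]] = ['e','r'] ∨ [cs[i]] = ['E','R']))]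
        by_cases hc : cs[i] = 't' ∨ cs[i] = 'T' ∨ cs[i] = 'i' ∨ cs[i] = 'I'
        · rw [if_pos hc, if_pos hc, ih (i + 1) result (by omega), h2, tigSubB_nil,
              List.append_nil]
        · rw [if_neg hc, if_neg hc, ih (i + 1) (result ++ [cs[i]]) (by omega), h2, tigSubB_nil]
          simp
      | cons c2 rest =>
        have htwo : (cs.drop i).take 2 = [cs[i], c2] := by rw [hdrop, h2]; rfl
        have hdrop2 : cs.drop (i + 2) = rest := by
          have h12 : cs.drop (i + 2) = (cs.drop (i + 1)).drop 1 := by rw [List.drop_drop]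
          rw [h12, h2]; rfl
        rw [htwo, hdrop, h2, tigSubB_cons]
        by_cases hp : (cs[i] = 'g' ∧ c2 = 'g') ∨ (cs[i] = 'G' ∧ c2 = 'G') ∨
            (cs[i] = 'e' ∧ c2 = 'r') ∨ (cs[i] = 'E' ∧ c2 = 'R')
        · rw [if_pos hp]
          by_cases hgg : (cs[i] = 'g' ∧ c2 = 'g') ∨ (cs[i] = 'G' ∧ c2 = 'G')
          · have hl : [cs[i], c2] = ['g','g'] ∨ [cs[i], c2] = ['G','G'] := by
              rcases hgg with ⟨ha, hb⟩ | ⟨ha, hb⟩ <;> simp [ha, hb]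
            rw [if_pos hl, ih (i + 2) result (by omega), hdrop2]
          · have her : (cs[i] = 'e' ∧ c2 = 'r') ∨ (cs[i] = 'E' ∧ c2 = 'R') := by tauto
            have hne1 : ¬([cs[i], c2] = ['g','g'] ∨ [cs[i], c2] = ['G','G']) := by
              simp only [List.cons.injEq, and_true]; tauto
            have hl : [cs[i], c2] = ['e','r'] ∨ [cs[i], c2] = ['E','R'] := by
              rcases her with ⟨ha, hb⟩ | ⟨ha, hb⟩ <;> simp [ha, hb]
            rw [if_neg hne1, if_pos hl, ih (i + 2) result (by omega), hdrop2]
        · have hne1 : ¬([cs[i], c2] = ['g','g'] ∨ [cs[i], c2] = ['G','G']) := by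
            simp only [List.cons.injEq, and_true]; tauto
          have hne2 : ¬([cs[i], c2] = ['e','r'] ∨ [cs[i], c2] = ['E','R']) := by
            simp only [List.cons.injEq, and_true]; tauto
          rw [if_neg hp, if_neg hne1, if_neg hne2]
          by_cases hc : cs[i] = 't' ∨ cs[i] = 'T' ∨ cs[i] = 'i' ∨ cs[i] = 'I'
          · rw [if_pos hc, if_pos hc, ih (i + 1) result (by omega), h2]
          · rw [if_neg hc, if_neg hc, ih (i + 1) (result ++ [cs[i]]) (by omega), h2]
            simp
    · have hle : cs.length ≤ i := by omega
      rw [tigLoopA, dif_neg hi, List.drop_eq_nil_of_le hle, tigSubB_nil, List.append_nil]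

-- ===== VERDICT (by name: the statement is the Claim_ definition above) =====
theorem tiggerfy_spec : Claim_equal_tiggerfy := by
  intro word _
  unfold Spec_tiggerfy tiggerfy tiggerfy_alt
  rw [tigLoopA_eq word.toList word.toList.length 0 [] (by omega)]
  simp
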